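-- pv_equiv track=rewrite | github.com/ksomemo/Competitive-programming | atcoder/abc/115/D.py | layers
-- ===== SOURCE A (Python) =====
-- def layers(N):
--     layer = [0] * (N + 1)
--     layer[0] = 1
--     p_layer = [0] * (N + 1)
--     p_layer[0] = 1
--
--     for i in range(1, N+1):
--         layer[i] = 1 + layer[i-1] + 1 + layer[i-1] + 1
--         p_layer[i] = p_layer[i-1] + 1 + p_layer[i-1]
--
--     return layer, p_layer
-- ===== SOURCE B (Python) =====
-- def layers(N):
--     return ([(1 << (i + 2)) - 3 for i in range(N + 1)],
--             [(1 << (i + 1)) - 1 for i in range(N + 1)])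
-- ===== Notes on version B (the rewrite author's own statement) =====
-- stated objective: simpler
-- what changed: Replaces the DP loop that doubles a running accumulator into preallocated arrays by two comprehensions computing each entry independently from the closed forms layer[i]=2**(i+2)-3 and p_layer[i]=2**(i+1)-1.
import Mathlib
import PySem

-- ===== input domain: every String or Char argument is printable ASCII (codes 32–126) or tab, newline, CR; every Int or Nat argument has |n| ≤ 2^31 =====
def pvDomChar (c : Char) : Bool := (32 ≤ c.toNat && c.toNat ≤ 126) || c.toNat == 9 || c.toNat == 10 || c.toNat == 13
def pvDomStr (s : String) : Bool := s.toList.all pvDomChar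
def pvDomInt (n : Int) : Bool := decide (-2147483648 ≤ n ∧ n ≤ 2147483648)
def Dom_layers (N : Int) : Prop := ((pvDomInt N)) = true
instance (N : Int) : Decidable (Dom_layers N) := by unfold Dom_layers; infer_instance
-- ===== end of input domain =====

-- B replaces A's doubling DP loop by direct closed-form comprehensions (layer[i]=2^(i+2)-3, p_layer[i]=2^(i+1)-1): simpler, same cost.

-- ===== PORT A =====
-- one loop step: layer[i] = 1 + layer[i-1] + 1 + layer[i-1] + 1; p_layer[i] = p_layer[i-1] + 1 + p_layer[i-1]
def layersStep (s : List Int × List Int) (i : Int) : List Int × List Int :=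
  ( s.1.set i.toNat (1 + (PySem.List.pyGet? s.1 (i-1)).getD 0 + 1 + (PySem.List.pyGet? s.1 (i-1)).getD 0 + 1),
    s.2.set i.toNat ((PySem.List.pyGet? s.2 (i-1)).getD 0 + 1 + (PySem.List.pyGet? s.2 (i-1)).getD 0) )

def layers (N : Int) : List Int × List Int :=
  let layer := (List.replicate (N+1).toNat (0:Int)).set 0 1
  let p_layer := (List.replicate (N+1).toNat (0:Int)).set 0 1
  (PySem.List.pyRange 1 (N+1) 1).foldl layersStep (layer, p_layer)

-- ===== PORT B =====
-- Source B's '(1 << (i+2)) - 3' is exactly 2^(i+2) - 3 (left shift of 1 = power of two); ported as the power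
def layers_alt (N : Int) : List Int × List Int :=
  ( (List.range (N+1).toNat).map (fun i => (2:Int)^(i+2) - 3),
    (List.range (N+1).toNat).map (fun i => (2:Int)^(i+1) - 1) )

-- ===== PRECONDITION & SPEC =====
-- A raises IndexError for N < 0 ([0]*(N+1) is empty, so layer[0] = 1 fails); Pre_ excludes exactly those inputs.
def Pre_layers (N : Int) : Prop := 0 ≤ N
instance (N : Int) : Decidable (Pre_layers N) := by unfold Pre_layers; infer_instance
def pvWitness_layers : Int := 3

def Spec_layers (N : Int) (out : List Int × List Int) : Prop := out = layers_alt N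
instance (N : Int) (out : List Int × List Int) : Decidable (Spec_layers N out) := by unfold Spec_layers; infer_instance

-- ===== CLAIM (what is proved, stated in full; the proofs are below) =====
def Claim_equal_layers : Prop := ∀ (N : Int), Dom_layers N → Pre_layers N → Spec_layers N (layers N)

-- ===== LEMMAS AND PROOFS =====

-- partially-filled arrays after k loop iterations
def fA (n k : Nat) : List Int := (List.range (n+1)).map (fun i => if i ≤ k then (2:Int)^(i+2) - 3 else 0)
def gA (n k : Nat) : List Int := (List.range (n+1)).map (fun i => if i ≤ k then (2:Int)^(i+1) - 1 else 0)

lemma init_f (n : Nat) : (List.replicate (n+1) (0:Int)).set 0 1 = fA n 0 := by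
  apply List.ext_getElem
  · simp [fA]
  · intro i h1 h2
    simp only [fA, List.getElem_set, List.getElem_replicate, List.getElem_map,
      List.getElem_range]
    rcases Nat.eq_zero_or_pos i with h | h
    · subst h; norm_num
    · rw [if_neg (by omega), if_neg (by omega)]

lemma init_g (n : Nat) : (List.replicate (n+1) (0:Int)).set 0 1 = gA n 0 := by
  apply List.ext_getElem
  · simp [gA]
  · intro i h1 h2
    simp only [gA, List.getElem_set, List.getElem_replicate, List.getElem_map,
      List.getElem_range]
    rcases Nat.eq_zero_or_pos i with h | h
    · subst h; norm_num
    · rw [if_neg (by omega), if_neg (by omega)]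

lemma get_fA (n k : Nat) (hk : k ≤ n) :
    PySem.List.pyGet? (fA n k) (k : Int) = some ((2:Int)^(k+2) - 3) := by
  rw [PySem.List.pyGet?_natCast]
  simp [fA, Nat.lt_succ_of_le hk]

lemma get_gA (n k : Nat) (hk : k ≤ n) :
    PySem.List.pyGet? (gA n k) (k : Int) = some ((2:Int)^(k+1) - 1) := by
  rw [PySem.List.pyGet?_natCast]
  simp [gA, Nat.lt_succ_of_le hk]

lemma set_fA (n k : Nat) :
    (fA n k).set (k+1) ((2:Int)^(k+3) - 3) = fA n (k+1) := by
  apply List.ext_getElem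
  · simp [fA]
  · intro i h1 h2
    simp only [fA, List.length_map, List.length_range] at h1 h2
    simp only [fA, List.getElem_set, List.getElem_map, List.getElem_range]
    split_ifs <;> first | rfl | (subst_vars; rfl) | (exfalso; omega)

lemma set_gA (n k : Nat) :
    (gA n k).set (k+1) ((2:Int)^(k+2) - 1) = gA n (k+1) := by
  apply List.ext_getElem
  · simp [gA]
  · intro i h1 h2
    simp only [gA, List.length_map, List.length_range] at h1 h2
    simp only [gA, List.getElem_set, List.getElem_map, List.getElem_range]
    split_ifs <;> first | rfl | (subst_vars; rfl) | (exfalso; omega)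

lemma init_fg (n : Nat) :
    (((List.replicate (n+1) (0:Int)).set 0 1, (List.replicate (n+1) (0:Int)).set 0 1) : List Int × List Int)
      = (fA n 0, gA n 0) := by
  rw [Prod.mk.injEq]; exact ⟨init_f n, init_g n⟩

lemma loop_inv (n k : Nat) (hk : k ≤ n) :
    (PySem.List.pyRange 1 ((k:Int)+1) 1).foldl layersStep (fA n 0, gA n 0) = (fA n k, gA n k) := by
  induction k with
  | zero => rw [PySem.List.pyRange_one_eq_nil (by norm_num)]; rfl
  | succ k ih =>
    have hk' : k ≤ n := by omega
    have hsplit : PySem.List.pyRange 1 ((k:Int)+1+1) 1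
        = PySem.List.pyRange 1 ((k:Int)+1) 1 ++ [(k:Int)+1] := by
      exact PySem.List.pyRange_one_succ_right (by omega)
    push_cast
    rw [hsplit, List.foldl_append, ih hk']
    simp only [List.foldl_cons, List.foldl_nil, layersStep]
    have hidx : ((k:Int) + 1 - 1) = (k : Int) := by ring
    rw [hidx, get_fA n k hk', get_gA n k hk']
    have htn : ((k:Int)+1).toNat = k + 1 := by omega
    rw [htn]
    have hf : (1 + ((2:Int)^(k+2) - 3) + 1 + ((2:Int)^(k+2) - 3) + 1) = (2:Int)^(k+3) - 3 := by
      rw [pow_succ]; ring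
    have hg : (((2:Int)^(k+1) - 1) + 1 + ((2:Int)^(k+1) - 1)) = (2:Int)^(k+2) - 1 := by
      rw [pow_succ]; ring
    simp only [Option.getD_some, hf, hg]
    rw [set_fA n k, set_gA n k]

lemma fA_full (n : Nat) : fA n n = (List.range (n+1)).map (fun i => (2:Int)^(i+2) - 3) := by
  apply List.map_congr_left
  intro i hi
  simp only [List.mem_range] at hi
  simp [Nat.lt_succ_iff.mp hi]

lemma gA_full (n : Nat) : gA n n = (List.range (n+1)).map (fun i => (2:Int)^(i+1) - 1) := by
  apply List.map_congr_left
  intro i hi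
  simp only [List.mem_range] at hi
  simp [Nat.lt_succ_iff.mp hi]

-- ===== VERDICT (by name: the statement is the Claim_ definition above) =====
theorem layers_spec : Claim_equal_layers := by
  intro N _ hPre
  unfold Spec_layers
  lift N to Nat using hPre with n
  have htn : ((n:Int)+1).toNat = n + 1 := by omega
  unfold layers layers_alt
  simp only [htn]
  rw [init_fg, loop_inv n n le_rfl, fA_full, gA_full]
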